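-- pv_equiv track=rewrite | github.com/vedantp2905/CrossLingual_Analysis | lexical_analysis.py | analyze_character_types
-- ===== SOURCE A (Python) =====
-- from collections import Counter
--
-- def analyze_character_types(substrings):
--     char_types = Counter()
--     for word, count in substrings.items():
--         for char in word:
--             if char.islower():
--                 char_types['lowercase'] += count
--             elif char.isupper():
--                 char_types['uppercase'] += count
--             elif char.isdigit():
--                 char_types['digit'] += count
--             else:
--                 char_types['special'] += count
--     return char_types
-- ===== SOURCE B (Python) =====
-- from collections import Counter
--
-- def _category(char):
--     if char.islower():
--         return 'lowercase'
--     if char.isupper():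
--         return 'uppercase'
--     if char.isdigit():
--         return 'digit'
--     return 'special'
--
-- def analyze_character_types(substrings):
--     # Pass 1: weighted character-frequency table (one entry per distinct char).
--     char_freq = Counter()
--     for word, count in substrings.items():
--         for char in word:
--             char_freq[char] += count
--     # Pass 2: classify each distinct character exactly once.
--     char_types = Counter()
--     for char, total in char_freq.items():
--         char_types[_category(char)] += total
--     return char_types
-- ===== Notes on version B (the rewrite author's own statement) =====
-- stated objective: alternative
-- what changed: B first builds a weighted per-character frequency Counter over all occurrences, then classifies each DISTINCT character exactly once in a second pass over the frequency table, instead of A's reclassifying every character occurrence inline.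
import Mathlib
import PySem

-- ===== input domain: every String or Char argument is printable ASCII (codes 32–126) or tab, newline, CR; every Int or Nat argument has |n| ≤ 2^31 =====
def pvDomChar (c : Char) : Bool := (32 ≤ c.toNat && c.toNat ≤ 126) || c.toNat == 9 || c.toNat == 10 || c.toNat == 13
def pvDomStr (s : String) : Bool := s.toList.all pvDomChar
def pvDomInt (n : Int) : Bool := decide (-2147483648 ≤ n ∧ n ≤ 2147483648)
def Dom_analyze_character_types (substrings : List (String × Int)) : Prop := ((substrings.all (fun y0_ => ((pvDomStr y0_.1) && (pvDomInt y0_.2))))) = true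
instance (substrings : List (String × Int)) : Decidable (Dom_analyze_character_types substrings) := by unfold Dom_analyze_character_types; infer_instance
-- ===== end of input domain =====

-- B builds a weighted character-frequency table first and classifies each distinct
-- character once in a second pass (alternative decomposition; same exact result).


-- ===== PORT A =====
-- Counter() → PySem.Dict String Int; c[k] += v → modify k 0 (· + v)
def analyze_character_types (substrings : List (String × Int)) : List (String × Int) :=
  (substrings.foldl (fun char_types p =>
      p.1.toList.foldl (fun char_types char =>
        if PySem.Chars.islower char then char_types.modify "lowercase" 0 (· + p.2)
        else if PySem.Chars.isupper char then char_types.modify "uppercase" 0 (· + p.2)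
        else if PySem.Chars.isdigit char then char_types.modify "digit" 0 (· + p.2)
        else char_types.modify "special" 0 (· + p.2)) char_types)
    PySem.Dict.empty).items

-- ===== PORT B =====
-- port of Source B's helper _category
def pvCategory (c : Char) : String :=
  if PySem.Chars.islower c then "lowercase"
  else if PySem.Chars.isupper c then "uppercase"
  else if PySem.Chars.isdigit c then "digit"
  else "special"

def analyze_character_types_alt (substrings : List (String × Int)) : List (String × Int) :=
  -- Pass 1: weighted character-frequency table
  let char_freq : PySem.Dict Char Int :=
    substrings.foldl (fun char_freq p =>
      p.1.toList.foldl (fun char_freq char => char_freq.modify char 0 (· + p.2)) char_freq)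
      PySem.Dict.empty
  -- Pass 2: classify each distinct character exactly once
  (char_freq.items.foldl (fun char_types q =>
      char_types.modify (pvCategory q.1) 0 (· + q.2))
    PySem.Dict.empty).items

-- ===== PRECONDITION & SPEC =====
def Spec_analyze_character_types (substrings : List (String × Int)) (out : List (String × Int)) : Prop := out = analyze_character_types_alt substrings
instance (substrings : List (String × Int)) (out : List (String × Int)) : Decidable (Spec_analyze_character_types substrings out) := by unfold Spec_analyze_character_types; infer_instance

-- ===== CLAIM (what is proved, stated in full; the proofs are below) =====
def Claim_equal_analyze_character_types : Prop := ∀ (substrings : List (String × Int)), Dom_analyze_character_types substrings → Spec_analyze_character_types substrings (analyze_character_types substrings)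

-- ===== LEMMAS AND PROOFS =====

/-- `c[k] += n` on a Counter. -/
def pvBump {K : Type} [DecidableEq K] (d : PySem.Dict K Int) (k : K) (n : Int) : PySem.Dict K Int :=
  d.modify k 0 (· + n)

lemma pvBump_merge {K : Type} [DecidableEq K] (d : PySem.Dict K Int) (k : K) (m n : Int) :
    pvBump (pvBump d k m) k n = pvBump d k (m + n) := by
  simp [pvBump, PySem.Dict.modify, PySem.Dict.getD_insert_self, PySem.Dict.insert_insert_self,
    add_assoc]

lemma pvBump_comm {K : Type} [DecidableEq K] (d : PySem.Dict K Int) {k : K} (k' : K) (n m : Int)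
    (h : d.contains k = true) :
    pvBump (pvBump d k n) k' m = pvBump (pvBump d k' m) k n := by
  by_cases hkk : k' = k
  · subst hkk; rw [pvBump_merge, pvBump_merge, add_comm]
  · have hA : (d.insert k (d.getD k 0 + n)).getD k' 0 = d.getD k' 0 := by
      simp [PySem.Dict.getD_insert, hkk]
    have hB : (d.insert k' (d.getD k' 0 + m)).getD k 0 = d.getD k 0 := by
      simp [PySem.Dict.getD_insert, Ne.symm hkk]
    have hCB : (d.insert k' (d.getD k' 0 + m)).contains k = true := by
      simp [PySem.Dict.contains_insert, h]
    by_cases hck' : d.contains k' = true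
    · -- both keys present: items get mapped twice, maps commute
      have hCA : (d.insert k (d.getD k 0 + n)).contains k' = true := by
        simp [PySem.Dict.contains_insert, hck']
      apply PySem.Dict.ext
      simp only [pvBump, PySem.Dict.modify]
      rw [hA, hB, PySem.Dict.items_insert_of_contains _ _ hCA,
        PySem.Dict.items_insert_of_contains _ _ hCB,
        PySem.Dict.items_insert_of_contains _ _ h,
        PySem.Dict.items_insert_of_contains _ _ hck', List.map_map, List.map_map]
      apply List.map_congr_left
      intro p _
      by_cases h1 : p.1 = k <;> by_cases h2 : p.1 = k' <;>
        simp_all [Ne.symm hkk]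
    · -- k' fresh: it is appended on both sides
      have hck'' : d.contains k' = false := by simpa using hck'
      have hCA : (d.insert k (d.getD k 0 + n)).contains k' = false := by
        simp [PySem.Dict.contains_insert, hck'', hkk]
      apply PySem.Dict.ext
      simp only [pvBump, PySem.Dict.modify]
      rw [hA, hB, PySem.Dict.items_insert_of_not_contains _ _ hCA,
        PySem.Dict.items_insert_of_contains _ _ hCB,
        PySem.Dict.items_insert_of_contains _ _ h,
        PySem.Dict.items_insert_of_not_contains _ _ hck'', List.map_append]
      simp [hkk]

/-- The classification step of both ports, over (char, amount) pairs. -/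
def pvStep (d : PySem.Dict String Int) (q : Char × Int) : PySem.Dict String Int :=
  pvBump d (pvCategory q.1) q.2

lemma pvStep_eq_if (d : PySem.Dict String Int) (c : Char) (n : Int) :
    (if PySem.Chars.islower c then d.modify "lowercase" 0 (· + n)
     else if PySem.Chars.isupper c then d.modify "uppercase" 0 (· + n)
     else if PySem.Chars.isdigit c then d.modify "digit" 0 (· + n)
     else d.modify "special" 0 (· + n)) = pvStep d (c, n) := by
  simp only [pvStep, pvBump, pvCategory]
  split_ifs <;> rfl

lemma pvFoldl_bump_out (l : List (Char × Int)) (d : PySem.Dict String Int) (k : String) (n : Int)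
    (h : d.contains k = true) :
    l.foldl pvStep (pvBump d k n) = pvBump (l.foldl pvStep d) k n := by
  induction l generalizing d with
  | nil => rfl
  | cons q l ih =>
    have hc : (pvStep d q).contains k = true := by
      simp [pvStep, pvBump, PySem.Dict.modify, PySem.Dict.contains_insert, h]
    calc (q :: l).foldl pvStep (pvBump d k n)
        = l.foldl pvStep (pvBump (pvStep d q) k n) := by
          simp only [List.foldl_cons, pvStep, pvBump_comm d _ _ _ h]
      _ = pvBump (l.foldl pvStep (pvStep d q)) k n := ih _ hc

/-- Frequency-table building step of B's first pass. -/
def pvFStep (d : PySem.Dict Char Int) (q : Char × Int) : PySem.Dict Char Int :=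
  pvBump d q.1 q.2

lemma pvNodup_keys_fold (l : List (Char × Int)) (d : PySem.Dict Char Int)
    (h : d.keys.Nodup) : (l.foldl pvFStep d).keys.Nodup := by
  simpa [pvFStep, pvBump] using
    PySem.Dict.nodup_keys_foldl_modify_key l Prod.fst 0 (fun _ q => (· + q.2)) d h

/-- The crux: classifying every occurrence equals building the frequency table and
    classifying each distinct character once. -/
lemma pvMain (occ : List (Char × Int)) :
    occ.foldl pvStep PySem.Dict.empty
      = (occ.foldl pvFStep PySem.Dict.empty).items.foldl pvStep PySem.Dict.empty := by
  induction occ using List.reverseRecOn with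
  | nil => rfl
  | append_singleton occ p ih =>
    obtain ⟨c, n⟩ := p
    set freq := occ.foldl pvFStep PySem.Dict.empty with hfreq
    have hnd : freq.keys.Nodup := pvNodup_keys_fold occ _ (by simp)
    rw [List.foldl_append, List.foldl_append, List.foldl_cons, List.foldl_nil,
      List.foldl_cons, List.foldl_nil, ← hfreq, ih]
    show pvStep (freq.items.foldl pvStep PySem.Dict.empty) (c, n)
        = (pvFStep freq (c, n)).items.foldl pvStep PySem.Dict.empty
    by_cases hc : freq.contains c = true
    · -- c already in the table: its entry (c, v) becomes (c, v + n) in place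
      have hmemk : c ∈ freq.keys := (PySem.Dict.contains_iff_mem_keys freq c).mp hc
      obtain ⟨p, hp, hp1⟩ : ∃ p ∈ freq.items, p.1 = c := by
        simpa [PySem.Dict.keys, List.mem_map] using hmemk
      obtain ⟨v, rfl⟩ : ∃ v, p = (c, v) := ⟨p.2, by rw [← hp1]⟩
      obtain ⟨l1, l2, hsplit⟩ := List.append_of_mem hp
      have hkeys : freq.keys = l1.map Prod.fst ++ c :: l2.map Prod.fst := by
        simp [PySem.Dict.keys, hsplit]
      have hndk := hkeys ▸ hnd
      rw [List.nodup_append] at hndk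
      have hnotl1 : ∀ q ∈ l1, q.1 ≠ c := by
        intro q hq
        exact hndk.2.2 q.1 (List.mem_map_of_mem hq) c (List.mem_cons_self)
      have hnotl2 : ∀ q ∈ l2, q.1 ≠ c := by
        intro q hq
        have h2 := hndk.2.1
        rw [List.nodup_cons] at h2
        exact fun hqc => h2.1 (hqc ▸ List.mem_map_of_mem hq)
      have hv : freq.getD c 0 = v := PySem.Dict.getD_of_mem_items freq hp hnd 0
      have e1 : List.map (fun p => if (p.1 == c) = true then (c, v + n) else p) l1 = l1 :=
        (List.map_congr_left (g := id) (fun q hq => by simp [hnotl1 q hq])).trans (List.map_id _)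
      have e2 : List.map (fun p => if (p.1 == c) = true then (c, v + n) else p) l2 = l2 :=
        (List.map_congr_left (g := id) (fun q hq => by simp [hnotl2 q hq])).trans (List.map_id _)
      have hitems' : (pvFStep freq (c, n)).items = l1 ++ (c, v + n) :: l2 := by
        simp only [pvFStep, pvBump, PySem.Dict.modify, hv,
          PySem.Dict.items_insert_of_contains _ _ hc, hsplit, List.map_append, List.map_cons,
          e1, e2, beq_self_eq_true, if_true]
      have hcontains1 : (pvStep (l1.foldl pvStep PySem.Dict.empty) (c, v)).contains (pvCategory c) = true := by
        simp [pvStep, pvBump, PySem.Dict.modify]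
      calc pvStep (freq.items.foldl pvStep PySem.Dict.empty) (c, n)
          = pvStep (l2.foldl pvStep (pvStep (l1.foldl pvStep PySem.Dict.empty) (c, v))) (c, n) := by
            rw [hsplit]; simp [List.foldl_append]
        _ = l2.foldl pvStep (pvStep (pvStep (l1.foldl pvStep PySem.Dict.empty) (c, v)) (c, n)) := by
            exact (pvFoldl_bump_out l2 _ (pvCategory c) n hcontains1).symm
        _ = l2.foldl pvStep (pvStep (l1.foldl pvStep PySem.Dict.empty) (c, v + n)) := by
            simp only [pvStep, pvBump_merge]
        _ = (pvFStep freq (c, n)).items.foldl pvStep PySem.Dict.empty := by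
            rw [hitems']; simp [List.foldl_append]
    · -- c fresh: its entry is appended to the table
      have hc' : freq.contains c = false := by simpa using hc
      have hitems' : (pvFStep freq (c, n)).items = freq.items ++ [(c, 0 + n)] := by
        simp only [pvFStep, pvBump, PySem.Dict.modify,
          PySem.Dict.getD_of_not_contains _ _ hc',
          PySem.Dict.items_insert_of_not_contains _ _ hc']
      rw [hitems', List.foldl_append, List.foldl_cons, List.foldl_nil]
      simp [pvStep, zero_add]

lemma pvFoldl_flatMap {α β γ : Type} (l : List α) (f : α → List β) (g : γ → β → γ) (i : γ) :
    (l.flatMap f).foldl g i = l.foldl (fun a x => (f x).foldl g a) i := by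
  induction l generalizing i with
  | nil => rfl
  | cons x l ih => simp [List.flatMap_cons, List.foldl_append, ih]

/-- The flattened occurrence list both ports process. -/
def pvOcc (substrings : List (String × Int)) : List (Char × Int) :=
  substrings.flatMap (fun p => p.1.toList.map (fun c => (c, p.2)))

lemma pvA_eq (substrings : List (String × Int)) :
    analyze_character_types substrings = ((pvOcc substrings).foldl pvStep PySem.Dict.empty).items := by
  unfold analyze_character_types pvOcc
  rw [pvFoldl_flatMap]
  congr 1
  apply List.foldl_ext
  intro d p _
  rw [List.foldl_map]
  apply List.foldl_ext
  intro d c _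
  exact pvStep_eq_if d c p.2

lemma pvB_eq (substrings : List (String × Int)) :
    analyze_character_types_alt substrings
      = (((pvOcc substrings).foldl pvFStep PySem.Dict.empty).items.foldl pvStep PySem.Dict.empty).items := by
  have h1 : (substrings.foldl (fun char_freq p =>
      p.1.toList.foldl (fun char_freq char => char_freq.modify char 0 (· + p.2)) char_freq)
      PySem.Dict.empty)
      = (pvOcc substrings).foldl pvFStep PySem.Dict.empty := by
    unfold pvOcc
    rw [pvFoldl_flatMap]
    apply List.foldl_ext
    intro d p _
    rw [List.foldl_map]
    rfl
  have h2 : ∀ fr : PySem.Dict Char Int,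
      fr.items.foldl (fun char_types q =>
        char_types.modify (pvCategory q.1) 0 (· + q.2)) PySem.Dict.empty
      = fr.items.foldl pvStep PySem.Dict.empty := fun _ => rfl
  simp only [analyze_character_types_alt]
  rw [h1, h2]

-- ===== VERDICT (by name: the statement is the Claim_ definition above) =====
theorem analyze_character_types_spec : Claim_equal_analyze_character_types := by
  intro substrings _
  unfold Spec_analyze_character_types
  rw [pvA_eq, pvB_eq, pvMain]
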